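-- pv_equiv track=rewrite | github.com/amyhlback/adventofcode2020 | 06.py | sumallyes
-- ===== SOURCE A (Python) =====
-- def sumallyes(data):
-- 	matching = 0
-- 	grouping = set('abcdefghijklmnopqrstuvwxyz')
-- 	for i in data:
-- 		if i == "":
-- 			matching += len(grouping)
-- 			grouping = set('abcdefghijklmnopqrstuvwxyz')
-- 		else:
-- 			grouping.intersection_update(i)
-- 	return matching + len(grouping)
-- ===== SOURCE B (Python) =====
-- def sumallyes(data):
--     # Two-phase: partition into blank-separated groups, then sum the size of
--     # alphabet.intersection(*group) per group (empty group -> all 26 letters).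
--     alphabet = set('abcdefghijklmnopqrstuvwxyz')
--     groups, cur = [], []
--     for line in data:
--         if line == "":
--             groups.append(cur)
--             cur = []
--         else:
--             cur.append(line)
--     groups.append(cur)
--     return sum(len(alphabet.intersection(*g)) for g in groups)
-- ===== Notes on version B (the rewrite author's own statement) =====
-- stated objective: alternative
-- what changed: Replaces A's single streaming accumulator (running set flushed on blank lines) with a two-phase structure: first partition the lines into blank-separated groups, then sum len(alphabet.intersection(*group)) over the groups.
import Mathlib
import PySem

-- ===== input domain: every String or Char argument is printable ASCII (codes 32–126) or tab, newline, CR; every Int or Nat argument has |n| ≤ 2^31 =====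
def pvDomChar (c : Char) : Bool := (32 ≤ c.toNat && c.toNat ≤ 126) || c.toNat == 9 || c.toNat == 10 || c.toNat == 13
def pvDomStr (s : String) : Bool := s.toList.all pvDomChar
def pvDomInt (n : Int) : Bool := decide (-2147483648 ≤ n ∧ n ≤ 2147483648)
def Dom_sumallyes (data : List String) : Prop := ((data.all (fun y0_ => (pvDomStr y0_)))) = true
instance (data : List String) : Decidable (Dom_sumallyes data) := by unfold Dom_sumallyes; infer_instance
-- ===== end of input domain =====

-- B partitions the input into blank-separated groups and sums the size of the
-- per-group intersection (starting from the full alphabet), instead of A's single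
-- streaming accumulator; same cost, different decomposition.

-- ===== PORT A =====
def pvAlpha : PySem.Set Char := PySem.Set.ofList "abcdefghijklmnopqrstuvwxyz".toList

def sumallyes (data : List String) : Int :=
  let p := data.foldl
    (fun (st : Int × PySem.Set Char) i =>
      if i = "" then (st.1 + (PySem.Set.len st.2 : Int), pvAlpha)
      else (st.1, PySem.Set.inter st.2 i.toList))
    (0, pvAlpha)
  p.1 + (PySem.Set.len p.2 : Int)

-- ===== PORT B =====
-- flush current group on a blank line; final flush gives the last (possibly empty) group
def pvSplitGroups : List String → List String → List (List String)
  | [], cur => [cur]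
  | l :: ls, cur =>
      if l = "" then cur :: pvSplitGroups ls [] else pvSplitGroups ls (cur ++ [l])

-- len(alphabet.intersection(*g))
def pvGroupCount (g : List String) : Int :=
  (PySem.Set.len (g.foldl (fun (s : PySem.Set Char) i => PySem.Set.inter s i.toList) pvAlpha) : Int)

def sumallyes_alt (data : List String) : Int :=
  ((pvSplitGroups data []).map pvGroupCount).sum

-- ===== PRECONDITION & SPEC =====
def Spec_sumallyes (data : List String) (out : Int) : Prop := out = sumallyes_alt data
instance (data : List String) (out : Int) : Decidable (Spec_sumallyes data out) := by unfold Spec_sumallyes; infer_instance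

-- ===== CLAIM =====
def Claim_equal_sumallyes : Prop := ∀ (data : List String), Dom_sumallyes data → Spec_sumallyes data (sumallyes data)

-- ===== LEMMAS AND PROOFS =====

def pvRed (g : PySem.Set Char) (lines : List String) : PySem.Set Char :=
  lines.foldl (fun (s : PySem.Set Char) i => PySem.Set.inter s i.toList) g

theorem pvRed_append_singleton (cur : List String) (l : String) (g : PySem.Set Char) :
    pvRed g (cur ++ [l]) = PySem.Set.inter (pvRed g cur) l.toList := by
  simp [pvRed, List.foldl_append]

-- A's streaming loop, started on the partially reduced set of the current group,
-- equals B's sum over the remaining groups.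
theorem pv_key : ∀ (data : List String) (m : Int) (cur : List String),
    ((data.foldl
        (fun (st : Int × PySem.Set Char) i =>
          if i = "" then (st.1 + (PySem.Set.len st.2 : Int), pvAlpha)
          else (st.1, PySem.Set.inter st.2 i.toList))
        (m, pvRed pvAlpha cur)).1 +
      ((data.foldl
        (fun (st : Int × PySem.Set Char) i =>
          if i = "" then (st.1 + (PySem.Set.len st.2 : Int), pvAlpha)
          else (st.1, PySem.Set.inter st.2 i.toList))
        (m, pvRed pvAlpha cur)).2.len : Int)) =
    m + ((pvSplitGroups data cur).map pvGroupCount).sum := by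
  intro data
  induction data with
  | nil =>
      intro m cur
      simp only [List.foldl_nil, pvSplitGroups, List.map_cons, List.map_nil,
        List.sum_cons, List.sum_nil, pvGroupCount, pvRed]
      ring
  | cons l ls ih =>
      intro m cur
      by_cases hl : l = ""
      · subst hl
        have key := ih (m + (PySem.Set.len (pvRed pvAlpha cur) : Int)) []
        rw [show pvRed pvAlpha ([] : List String) = pvAlpha from by
          rw [pvRed, List.foldl_nil]] at key
        simp only [List.foldl_cons, pvSplitGroups, reduceIte, List.map_cons, List.sum_cons]
        rw [key, show pvGroupCount cur = (PySem.Set.len (pvRed pvAlpha cur) : Int) by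
          rw [pvGroupCount, pvRed]]
        ring
      · simp only [List.foldl_cons, pvSplitGroups, if_neg hl]
        rw [← pvRed_append_singleton]
        exact ih m (cur ++ [l])

-- ===== VERDICT =====
theorem sumallyes_spec : Claim_equal_sumallyes := by
  intro data _
  unfold Spec_sumallyes sumallyes sumallyes_alt
  have := pv_key data 0 []
  simpa [pvRed] using this
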